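-- pv_equiv track=rewrite | github.com/pypi-data/pypi-mirror-389 | packages/reactor-runtime/reactor_runtime-0.0.2.tar.gz/reactor_runtime-0.0.2/src/reactor_cli/main.py | is_version_compatible
-- ===== SOURCE A (Python) =====
-- def is_version_compatible(manifest_version: str, runtime_version: str) -> bool:
-- 	"""Check if the manifest version is compatible with the runtime version.
--
-- 	The manifest_version can be a partial version specification:
-- 	- "0" matches any "0.x.x"
-- 	- "0.0" matches any "0.0.x"
-- 	- "0.0.0" must match exactly "0.0.0"
--
-- 	Args:
-- 		manifest_version: Version specified in manifest.json (1, 2, or 3 parts)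
-- 		runtime_version: Installed runtime version (always 3 parts)
--
-- 	Returns:
-- 		bool: True if versions are compatible, False otherwise
-- 	"""
-- 	try:
-- 		# Split versions into parts
-- 		manifest_parts = manifest_version.split('.')
-- 		runtime_parts = runtime_version.split('.')
--
-- 		# Compare only the parts specified in manifest_version
-- 		for i in range(len(manifest_parts)):
-- 			if i >= len(runtime_parts):
-- 				# Runtime version has fewer parts than expected
-- 				return False
-- 			if manifest_parts[i] != runtime_parts[i]:
-- 				return False
--
-- 		return True
-- 	except Exception:
-- 		# If anything goes wrong (e.g., invalid version format), return False
-- 		return False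
-- ===== SOURCE B (Python) =====
-- def is_version_compatible(manifest_version: str, runtime_version: str) -> bool:
-- 	try:
-- 		return (runtime_version == manifest_version
-- 				or runtime_version.startswith(manifest_version + '.'))
-- 	except Exception:
-- 		return False
-- ===== Notes on version B (the rewrite author's own statement) =====
-- stated objective: idiomatic
-- what changed: Replaces splitting both versions into part-lists and an index loop with a direct string test: exact equality or startswith(manifest_version + '.'), the trailing dot enforcing the component boundary.
import Mathlib
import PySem

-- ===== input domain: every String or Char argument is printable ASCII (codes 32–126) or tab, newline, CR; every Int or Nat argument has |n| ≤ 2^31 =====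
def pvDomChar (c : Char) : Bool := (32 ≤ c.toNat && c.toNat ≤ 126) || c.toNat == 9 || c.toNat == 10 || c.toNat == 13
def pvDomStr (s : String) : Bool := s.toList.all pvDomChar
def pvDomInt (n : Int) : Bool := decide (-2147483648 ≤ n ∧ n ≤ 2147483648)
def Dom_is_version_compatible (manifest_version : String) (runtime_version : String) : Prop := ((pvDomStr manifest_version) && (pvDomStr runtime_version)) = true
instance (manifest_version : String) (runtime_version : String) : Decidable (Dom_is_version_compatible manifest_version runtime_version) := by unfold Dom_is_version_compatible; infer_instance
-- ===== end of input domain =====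

-- B replaces A's split-into-parts loop with a direct string test (equality or
-- startswith with a trailing '.'); objective: idiomatic. Equivalence is proved on all inputs.

-- ===== PORT A =====
-- the 'for i in range(len(manifest_parts))' prefix-comparison loop, as the
-- obvious structural recursion over the two part lists
def pvLoopA : List (List Char) → List (List Char) → Bool
  | [], _ => true
  | _ :: _, [] => false
  | m :: ms, r :: rs => if m ≠ r then false else pvLoopA ms rs

-- A: split both versions on '.' (never raises for a literal '.' separator,
-- so the try/except never fires) and compare the manifest parts as a prefix
def is_version_compatible (manifest_version : String) (runtime_version : String) : Bool :=
  pvLoopA (PySem.Chars.splitOn manifest_version.toList ['.'])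
          (PySem.Chars.splitOn runtime_version.toList ['.'])

-- ===== PORT B =====
def is_version_compatible_alt (manifest_version : String) (runtime_version : String) : Bool :=
  (runtime_version == manifest_version)
    || PySem.Str.startswith runtime_version (manifest_version ++ ".")

-- ===== PRECONDITION & SPEC =====
def Spec_is_version_compatible (manifest_version : String) (runtime_version : String) (out : Bool) : Prop := out = is_version_compatible_alt manifest_version runtime_version
instance (manifest_version : String) (runtime_version : String) (out : Bool) : Decidable (Spec_is_version_compatible manifest_version runtime_version out) := by unfold Spec_is_version_compatible; infer_instance

-- ===== CLAIM (what is proved, stated in full; the proofs are below) =====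
def Claim_equal_is_version_compatible : Prop := ∀ (manifest_version : String) (runtime_version : String), Dom_is_version_compatible manifest_version runtime_version → Spec_is_version_compatible manifest_version runtime_version (is_version_compatible manifest_version runtime_version)

-- ===== LEMMAS AND PROOFS =====

-- structural re-statement of splitOn with separator ['.']
def pvSplit : List Char → List (List Char)
  | [] => [[]]
  | c :: rest => if c = '.' then [] :: pvSplit rest
                 else (pvSplit rest).modifyHead (c :: ·)

theorem pvSplit_ne_nil (l : List Char) : pvSplit l ≠ [] := by
  cases l with
  | nil => simp [pvSplit]
  | cons c rest =>
    simp only [pvSplit]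
    split_ifs
    · simp
    · cases h : pvSplit rest with
      | nil => exact absurd h (pvSplit_ne_nil rest)
      | cons a as => simp

theorem pv_go_eq (fuel : Nat) (l cur : List Char) (acc : List (List Char))
    (h : l.length ≤ fuel) :
    PySem.Chars.splitOn.go ['.'] fuel l cur acc
      = acc.reverse ++ (pvSplit l).modifyHead (cur.reverse ++ ·) := by
  induction fuel generalizing l cur acc with
  | zero =>
    cases l with
    | nil => simp [PySem.Chars.splitOn.go, pvSplit]
    | cons c rest => simp at h
  | succ f ih =>
    cases l with
    | nil => simp [PySem.Chars.splitOn.go, pvSplit]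
    | cons c rest =>
      simp only [List.length_cons, Nat.succ_le_succ_iff] at h
      by_cases hc : c = '.'
      · subst hc
        rw [show PySem.Chars.splitOn.go ['.'] (f+1) ('.' :: rest) cur acc
              = PySem.Chars.splitOn.go ['.'] f rest [] (cur.reverse :: acc) by simp [PySem.Chars.splitOn.go, List.isPrefixOf]]
        rw [ih _ _ _ h]
        simp only [pvSplit, reduceIte, List.reverse_nil, List.nil_append, List.reverse_cons,
          List.append_assoc, List.singleton_append]
        cases pvSplit rest <;> simp
      · rw [show PySem.Chars.splitOn.go ['.'] (f+1) (c :: rest) cur acc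
              = PySem.Chars.splitOn.go ['.'] f rest (c :: cur) acc by simp [PySem.Chars.splitOn.go, List.isPrefixOf, Ne.symm hc]]
        rw [ih _ _ _ h]
        simp only [pvSplit, hc, if_false]
        cases hsp : pvSplit rest with
        | nil => exact absurd hsp (pvSplit_ne_nil rest)
        | cons a as => simp

theorem pvSplitOn_eq (l : List Char) : PySem.Chars.splitOn l ['.'] = pvSplit l := by
  rw [PySem.Chars.splitOn, pv_go_eq (l.length + 1) l [] [] (by omega)]
  cases hsp : pvSplit l with
  | nil => exact absurd hsp (pvSplit_ne_nil l)
  | cons a as => simp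

-- pvLoopA is unchanged by consing the same char onto both heads
theorem pvLoopA_modifyHead (c : Char) (m r : List Char) (ms rs : List (List Char)) :
    pvLoopA ((c :: m) :: ms) ((c :: r) :: rs) = pvLoopA (m :: ms) (r :: rs) := by
  simp [pvLoopA]

-- the core equivalence, on pvSplit
theorem pv_main (mc rc : List Char) :
    pvLoopA (pvSplit mc) (pvSplit rc)
      = (decide (rc = mc) || (mc ++ ['.']).isPrefixOf rc) := by
  induction mc generalizing rc with
  | nil =>
    cases rc with
    | nil => simp [pvSplit, pvLoopA]
    | cons d rc' =>
      by_cases hd : d = '.'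
      · subst hd
        simp [pvSplit, pvLoopA, List.isPrefixOf, pvSplit_ne_nil rc']
      · simp only [pvSplit, hd, if_false]
        cases hsp : pvSplit rc' with
        | nil => exact absurd hsp (pvSplit_ne_nil rc')
        | cons a as => simp [pvLoopA, List.isPrefixOf, hd, Ne.symm hd]
  | cons c mc' ih =>
    by_cases hc : c = '.'
    · subst hc
      cases rc with
      | nil =>
        simp only [pvSplit, pvLoopA]
        cases hsp : pvSplit mc' with
        | nil => exact absurd hsp (pvSplit_ne_nil mc')
        | cons a as => simp [pvLoopA, List.isPrefixOf]
      | cons d rc' =>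
        by_cases hd : d = '.'
        · subst hd
          simp only [pvSplit, reduceIte]
          rw [show pvLoopA ([] :: pvSplit mc') ([] :: pvSplit rc') = pvLoopA (pvSplit mc') (pvSplit rc') by simp [pvLoopA]]
          rw [ih rc']
          simp [List.isPrefixOf]
        · simp only [pvSplit, reduceIte, hd, if_false]
          cases hsp : pvSplit rc' with
          | nil => exact absurd hsp (pvSplit_ne_nil rc')
          | cons a as => simp [pvLoopA, List.isPrefixOf, hd, Ne.symm hd, pvSplit_ne_nil]
    · cases rc with
      | nil =>
        simp only [pvSplit, hc, if_false]
        cases hsp : pvSplit mc' with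
        | nil => exact absurd hsp (pvSplit_ne_nil mc')
        | cons a as => simp [pvSplit, pvLoopA, List.isPrefixOf]
      | cons d rc' =>
        by_cases hd : d = '.'
        · subst hd
          simp only [pvSplit, hc, if_false, reduceIte]
          cases hsp : pvSplit mc' with
          | nil => exact absurd hsp (pvSplit_ne_nil mc')
          | cons a as => simp [pvLoopA, List.isPrefixOf, hc, Ne.symm hc]
        · by_cases hcd : c = d
          · subst hcd
            simp only [pvSplit, hc, if_false]
            cases hspm : pvSplit mc' with
            | nil => exact absurd hspm (pvSplit_ne_nil mc')
            | cons a as =>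
              cases hspr : pvSplit rc' with
              | nil => exact absurd hspr (pvSplit_ne_nil rc')
              | cons b bs =>
                rw [List.modifyHead, List.modifyHead, pvLoopA_modifyHead]
                have := ih rc'
                rw [hspm, hspr] at this
                rw [this]
                simp [List.isPrefixOf]
          · simp only [pvSplit, hc, hd, if_false]
            cases hspm : pvSplit mc' with
            | nil => exact absurd hspm (pvSplit_ne_nil mc')
            | cons a as =>
              cases hspr : pvSplit rc' with
              | nil => exact absurd hspr (pvSplit_ne_nil rc')
              | cons b bs => simp [pvLoopA, List.isPrefixOf, hcd, Ne.symm hcd]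

theorem pv_beq_strings (s t : String) : (s == t) = decide (s.toList = t.toList) := by
  by_cases hst : s = t
  · simp [hst]
  · have h2 : s.toList ≠ t.toList := fun h' => hst (String.toList_inj.mp h')
    simp [hst, h2]

-- ===== VERDICT (by name: the statement is the Claim_ definition above) =====
theorem is_version_compatible_spec : Claim_equal_is_version_compatible := by
  intro m r _
  unfold Spec_is_version_compatible is_version_compatible is_version_compatible_alt
  rw [pvSplitOn_eq, pvSplitOn_eq, pv_main, PySem.Str.startswith_eq, pv_beq_strings,
    PySem.Chars.startswith, String.toList_append]
  rfl
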